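-- pv_equiv track=rewrite | github.com/Gtxplosiom/capstone-project | backup/voiceRecognitionOffline.py | TrimString
-- ===== SOURCE A (Python) =====
-- def TrimString(input_string, keywords):
--     words = input_string.split()
--
--     for keyword in keywords:
--         try:
--             index_of_keyword = words.index(keyword)
--             trimmed_string = ' '.join(words[index_of_keyword:])
--             return trimmed_string
--         except ValueError:
--             continue  # Try the next keyword if the current one is not found
--
--     # None of the keywords were found in the string
--     return input_string
-- ===== SOURCE B (Python) =====
-- def TrimString(input_string, keywords):
--     priority = {}
--     for i, keyword in enumerate(keywords):
--         if keyword not in priority: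
--             priority[keyword] = i
--     words = input_string.split()
--     best_priority = None
--     best_pos = None
--     for pos, word in enumerate(words):
--         p = priority.get(word)
--         if p is not None and (best_priority is None or p < best_priority):
--             best_priority = p
--             best_pos = pos
--     if best_pos is None:
--         return input_string
--     return ' '.join(words[best_pos:])
-- ===== Notes on version B (the rewrite author's own statement) =====
-- stated objective: faster
-- what changed: Replaced the loop over keywords with repeated list.index scans of the words by one dict of keyword priorities plus a single left-to-right pass over the words keeping a running minimum (priority, position).
import Mathlib
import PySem

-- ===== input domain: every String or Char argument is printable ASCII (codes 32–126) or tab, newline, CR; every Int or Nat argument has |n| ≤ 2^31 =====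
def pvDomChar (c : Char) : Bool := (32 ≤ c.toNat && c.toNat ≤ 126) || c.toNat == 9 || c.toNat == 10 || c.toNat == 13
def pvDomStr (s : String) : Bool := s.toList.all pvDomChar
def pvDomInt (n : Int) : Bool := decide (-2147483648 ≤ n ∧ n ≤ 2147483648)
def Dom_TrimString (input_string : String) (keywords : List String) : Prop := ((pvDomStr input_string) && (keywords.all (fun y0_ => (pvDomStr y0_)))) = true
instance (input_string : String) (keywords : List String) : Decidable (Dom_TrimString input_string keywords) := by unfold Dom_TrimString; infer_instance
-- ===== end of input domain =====

-- B replaces A's keyword loop of repeated words.index scans by one priority dict plus a single pass over the words keeping a running minimum (objective: faster).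

-- ===== PORT A =====
-- A's 'for keyword in keywords' loop with its try/except ValueError, as structural recursion over the keyword list.
def trimGoA (input_string : String) (words : List String) : List String → String
  | [] => input_string
  | keyword :: rest =>
    match PySem.List.index? words keyword with
    | some index_of_keyword =>
        PySem.Str.join " " (PySem.List.slice words (some ((index_of_keyword : Nat) : Int)) none)
    | none => trimGoA input_string words rest

def TrimString (input_string : String) (keywords : List String) : String :=
  trimGoA input_string (PySem.Str.split₀ input_string) keywords

-- ===== PORT B =====
-- one step of B's word loop: look the word up in the priority dict, update the running best (priority, position)
def trimStepB (prio : PySem.Dict String Int) (acc : Option (Int × Int)) (pw : Int × String) : Option (Int × Int) :=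
  match prio.get? pw.2 with
  | none => acc
  | some p =>
    match acc with
    | none => some (p, pw.1)
    | some b => if p < b.1 then some (p, pw.1) else acc

def TrimString_alt (input_string : String) (keywords : List String) : String :=
  let prio : PySem.Dict String Int :=
    (PySem.List.enumerate keywords 0).foldl
      (fun d ik => if d.contains ik.2 then d else d.insert ik.2 ik.1) PySem.Dict.empty
  let words := PySem.Str.split₀ input_string
  let best := (PySem.List.enumerate words 0).foldl (trimStepB prio) none
  match best with
  | none => input_string
  | some b => PySem.Str.join " " (PySem.List.slice words (some b.2) none)

-- ===== PRECONDITION & SPEC =====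
def Spec_TrimString (input_string : String) (keywords : List String) (out : String) : Prop := out = TrimString_alt input_string keywords
instance (input_string : String) (keywords : List String) (out : String) : Decidable (Spec_TrimString input_string keywords out) := by unfold Spec_TrimString; infer_instance

-- ===== CLAIM (what is proved, stated in full; the proofs are below) =====
def Claim_equal_TrimString : Prop := ∀ (input_string : String) (keywords : List String), Dom_TrimString input_string keywords → Spec_TrimString input_string keywords (TrimString input_string keywords)

-- ===== LEMMAS AND PROOFS =====

-- the running-best update of B, on an already-looked-up (priority, position) pair
def stepBest (acc : Option (Int × Int)) (x : Int × Int) : Option (Int × Int) :=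
  match acc with
  | none => some x
  | some b => if x.1 < b.1 then some x else acc

-- the (priority, position) pairs of the words that are keywords, positions starting at n
def hitsOf (f : String → Option Int) : List String → Int → List (Int × Int)
  | [], _ => []
  | w :: t, n =>
    match f w with
    | some p => (p, n) :: hitsOf f t (n + 1)
    | none => hitsOf f t (n + 1)

-- B's canonical value, with the dict lookup replaced by the keyword's first index in the list
def altCanon (s : String) (ks : List String) : String :=
  match (hitsOf (fun w => (PySem.List.index? ks w).map (fun m : Nat => (m : Int)))
      (PySem.Str.split₀ s) 0).foldl stepBest none with
  | none => s
  | some b => PySem.Str.join " " (PySem.List.slice (PySem.Str.split₀ s) (some b.2) none)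

theorem foldl_trimStepB_eq_hits (prio : PySem.Dict String Int) :
    ∀ (ws : List String) (n : Int) (acc : Option (Int × Int)),
      (PySem.List.enumerate ws n).foldl (trimStepB prio) acc
        = (hitsOf (prio.get?) ws n).foldl stepBest acc := by
  intro ws
  induction ws with
  | nil => intro n acc; simp [hitsOf, PySem.List.enumerate_nil]
  | cons w t ih =>
    intro n acc
    rw [PySem.List.enumerate_cons]
    simp only [List.foldl_cons, hitsOf]
    cases h : prio.get? w with
    | none => simp [trimStepB, h, ih]
    | some p => simp [trimStepB, h, ih, stepBest]

theorem hitsOf_congr {f g : String → Option Int} :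
    ∀ (ws : List String) (n : Int), (∀ w ∈ ws, f w = g w) → hitsOf f ws n = hitsOf g ws n := by
  intro ws
  induction ws with
  | nil => intro n _; rfl
  | cons w t ih =>
    intro n h
    simp only [hitsOf, h w (by simp)]
    rw [ih (n + 1) (fun x hx => h x (by simp [hx]))]

theorem hitsOf_shift {g : String → Option Int} :
    ∀ (ws : List String) (n : Int),
      hitsOf (fun w => (g w).map (· + 1)) ws n
        = (hitsOf g ws n).map (fun x => (x.1 + 1, x.2)) := by
  intro ws
  induction ws with
  | nil => intro n; rfl
  | cons w t ih =>
    intro n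
    simp only [hitsOf]
    cases g w <;> simp [ih]

theorem foldl_stepBest_shift :
    ∀ (L : List (Int × Int)) (acc : Option (Int × Int)),
      (L.map (fun x => (x.1 + 1, x.2))).foldl stepBest (acc.map (fun x => (x.1 + 1, x.2)))
        = (L.foldl stepBest acc).map (fun x => (x.1 + 1, x.2)) := by
  intro L
  induction L with
  | nil => intro acc; rfl
  | cons x t ih =>
    intro acc
    simp only [List.map_cons, List.foldl_cons]
    rw [← ih]
    congr 1
    cases acc with
    | none => rfl
    | some b =>
      simp only [Option.map_some, stepBest]
      by_cases h : x.1 < b.1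
      · rw [if_pos h, if_pos (show x.1 + 1 < b.1 + 1 by omega)]; simp
      · rw [if_neg h, if_neg (show ¬ x.1 + 1 < b.1 + 1 by omega)]; simp

theorem foldl_stepBest_stuck :
    ∀ (L : List (Int × Int)) (b : Int × Int), (∀ x ∈ L, ¬ x.1 < b.1) →
      L.foldl stepBest (some b) = some b := by
  intro L
  induction L with
  | nil => intro b _; rfl
  | cons x t ih =>
    intro b h
    simp only [List.foldl_cons, stepBest, if_neg (h x (by simp))]
    exact ih b (fun y hy => h y (by simp [hy]))

theorem mem_hitsOf_key {f : String → Option Int} :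
    ∀ (ws : List String) (n : Int) (x : Int × Int), x ∈ hitsOf f ws n →
      ∃ w ∈ ws, f w = some x.1 := by
  intro ws
  induction ws with
  | nil => intro n x hx; simp [hitsOf] at hx
  | cons w t ih =>
    intro n x hx
    simp only [hitsOf] at hx
    cases h : f w with
    | none =>
      rw [h] at hx
      obtain ⟨w', hw', hf⟩ := ih (n + 1) x hx
      exact ⟨w', by simp [hw'], hf⟩
    | some p =>
      rw [h] at hx
      rcases List.mem_cons.mp hx with h1 | h2
      · exact ⟨w, by simp, by rw [h, h1]⟩
      · obtain ⟨w', hw', hf⟩ := ih (n + 1) x h2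
        exact ⟨w', by simp [hw'], hf⟩

theorem hitsOf_nil_of_none {f : String → Option Int} :
    ∀ (ws : List String) (n : Int), (∀ w ∈ ws, f w = none) → hitsOf f ws n = [] := by
  intro ws
  induction ws with
  | nil => intro n _; rfl
  | cons w t ih =>
    intro n h
    simp only [hitsOf, h w (by simp)]
    exact ih (n + 1) (fun x hx => h x (by simp [hx]))

-- if the distinguished keyword k has priority 0 and occurs among the words,
-- the running best ends at (0, first position of k)
theorem foldl_stepBest_zero {f : String → Option Int} {k : String}
    (hk : f k = some 0)
    (hpos : ∀ w p, f w = some p → 0 ≤ p ∧ (p = 0 → w = k)) :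
    ∀ (ws : List String) (n : Int) (acc : Option (Int × Int)),
      k ∈ ws → (∀ b, acc = some b → 0 < b.1) →
      (hitsOf f ws n).foldl stepBest acc = some (0, n + (ws.idxOf k : Int)) := by
  intro ws
  induction ws with
  | nil => intro n acc h; simp at h
  | cons w t ih =>
    intro n acc hmem hacc
    by_cases hw : w = k
    · subst hw
      simp only [hitsOf, hk, List.foldl_cons, List.idxOf_cons_self]
      have hstep : stepBest acc (0, n) = some (0, n) := by
        cases acc with
        | none => rfl
        | some b => simp only [stepBest]; rw [if_pos (hacc b rfl)]
      rw [hstep, foldl_stepBest_stuck _ _ ?_]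
      · simp
      · intro x hx
        obtain ⟨w', _, hf⟩ := mem_hitsOf_key _ _ _ hx
        have := (hpos w' x.1 hf).1
        simpa using this
    · have hmem' : k ∈ t := by
        rcases List.mem_cons.mp hmem with h | h
        · exact absurd h (fun hh => hw hh.symm)
        · exact h
      have hidx : (((w :: t).idxOf k : Nat) : Int) = ((t.idxOf k : Nat) : Int) + 1 := by
        rw [List.idxOf_cons_ne _ hw]
        push_cast [Nat.succ_eq_add_one]; ring
      simp only [hitsOf]
      cases hfw : f w with
      | none =>
        rw [ih (n + 1) acc hmem' hacc, hidx]; congr 2; omega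
      | some p =>
        have hp : 0 < p := by
          rcases hpos w p hfw with ⟨h0, himp⟩
          rcases lt_or_eq_of_le h0 with h | h
          · exact h
          · exact absurd (himp h.symm) hw
        simp only [List.foldl_cons]
        have hacc' : ∀ b, stepBest acc (p, n) = some b → 0 < b.1 := by
          intro b hb
          cases acc with
          | none => simp only [stepBest] at hb; injection hb with hb'; rw [← hb']; exact hp
          | some b0 =>
            simp only [stepBest] at hb
            by_cases hlt : p < b0.1
            · rw [if_pos hlt] at hb; injection hb with hb'; rw [← hb']; exact hp
            · rw [if_neg hlt] at hb; injection hb with hb'; rw [← hb']; exact hacc b0 rfl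
        rw [ih (n + 1) _ hmem' hacc', hidx]; congr 2; omega
      
-- the priority dict B builds maps each word to its first index (offset by n) in the keyword list
theorem prioDict_get? :
    ∀ (ks : List String) (n : Int) (d : PySem.Dict String Int) (w : String),
      ((PySem.List.enumerate ks n).foldl
        (fun d ik => if d.contains ik.2 then d else d.insert ik.2 ik.1) d).get? w
        = Option.or (d.get? w) ((PySem.List.index? ks w).map (fun m : Nat => (m : Int) + n)) := by
  intro ks
  induction ks with
  | nil =>
    intro n d w
    rw [PySem.List.enumerate_nil]
    simp [PySem.List.index?_eq_idxOf?]
  | cons k t ih =>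
    intro n d w
    rw [PySem.List.enumerate_cons]
    simp only [List.foldl_cons]
    rw [ih]
    by_cases hw : w = k
    · subst hw
      rw [PySem.List.index?_cons_self]
      by_cases hc : d.contains w
      · rw [if_pos hc]
        obtain ⟨v, hv⟩ : ∃ v, d.get? w = some v := by
          rcases h : d.get? w with _ | v
          · rw [(PySem.Dict.get?_eq_none_iff_contains d w).mp h] at hc; exact absurd hc (by simp)
          · exact ⟨v, rfl⟩
        simp [hv]
      · rw [if_neg hc]
        have hnone : d.get? w = none :=
          (PySem.Dict.get?_eq_none_iff_contains d w).mpr (by simpa using hc)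
        rw [PySem.Dict.get?_insert_self, hnone]
        simp
    · have hgoal : Option.map (fun m : Nat => (m : Int) + (n + 1)) (PySem.List.index? t w)
          = Option.map (fun m : Nat => (m : Int) + n) (PySem.List.index? (k :: t) w) := by
        rw [PySem.List.index?_cons_of_ne t (fun h => hw h.symm), Option.map_map]
        apply Option.map_congr
        intro m _
        simp only [Function.comp_apply]
        push_cast; ring
      by_cases hc : d.contains k
      · rw [if_pos hc, hgoal]
      · rw [if_neg hc, PySem.Dict.get?_insert_of_ne _ _ hw, hgoal]

theorem alt_eq_canon (s : String) (ks : List String) :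
    TrimString_alt s ks = altCanon s ks := by
  have hcong : hitsOf (PySem.Dict.get? ((PySem.List.enumerate ks 0).foldl
        (fun d ik => if d.contains ik.2 then d else d.insert ik.2 ik.1) PySem.Dict.empty))
        (PySem.Str.split₀ s) 0
      = hitsOf (fun w => (PySem.List.index? ks w).map (fun m : Nat => (m : Int)))
        (PySem.Str.split₀ s) 0 := by
    apply hitsOf_congr
    intro w _
    rw [prioDict_get? ks 0 PySem.Dict.empty w]
    simp [PySem.Dict.empty, PySem.Dict.get?]
  unfold TrimString_alt altCanon
  simp only [foldl_trimStepB_eq_hits, hcong]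

theorem goA_eq_canon : ∀ (ks : List String) (s : String),
    trimGoA s (PySem.Str.split₀ s) ks = altCanon s ks := by
  intro ks
  induction ks with
  | nil =>
    intro s
    unfold altCanon
    rw [hitsOf_congr (g := fun _ => none) _ 0 (fun w _ => by
      rw [(PySem.List.index?_eq_none_iff [] w).mpr (by simp)]; rfl)]
    rw [hitsOf_nil_of_none]
    · rfl
    · intro w _; rfl
  | cons k rest ih =>
    intro s
    cases hidx : PySem.List.index? (PySem.Str.split₀ s) k with
    | none =>
      have hnot : k ∉ PySem.Str.split₀ s := (PySem.List.index?_eq_none_iff _ k).mp hidx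
      have hA : trimGoA s (PySem.Str.split₀ s) (k :: rest) = trimGoA s (PySem.Str.split₀ s) rest := by
        simp only [trimGoA, hidx]
      rw [hA, ih]
      unfold altCanon
      rw [hitsOf_congr
        (f := fun w => (PySem.List.index? (k :: rest) w).map (fun m : Nat => (m : Int)))
        (g := fun w =>
          ((PySem.List.index? rest w).map (fun m : Nat => (m : Int))).map (· + 1)) _ 0
        (fun w hwmem => by
          have hwk : k ≠ w := fun h => hnot (h ▸ hwmem)
          simp only
          rw [PySem.List.index?_cons_of_ne rest hwk, Option.map_map, Option.map_map]
          apply Option.map_congr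
          intro m _
          simp only [Function.comp_apply]
          push_cast; ring)]
      rw [hitsOf_shift]
      have := foldl_stepBest_shift
        (hitsOf (fun w => (PySem.List.index? rest w).map (fun m : Nat => (m : Int)))
          (PySem.Str.split₀ s) 0) none
      rw [show (Option.map (fun x : Int × Int => (x.1 + 1, x.2)) none = none) from rfl] at this
      rw [this]
      cases (hitsOf (fun w => (PySem.List.index? rest w).map (fun m : Nat => (m : Int)))
          (PySem.Str.split₀ s) 0).foldl stepBest none with
      | none => rfl
      | some b => rfl
    | some i =>
      have hA : trimGoA s (PySem.Str.split₀ s) (k :: rest)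
          = PySem.Str.join " " (PySem.List.slice (PySem.Str.split₀ s) (some ((i : Nat) : Int)) none) := by
        simp only [trimGoA, hidx]
      have hmem : k ∈ PySem.Str.split₀ s := by
        rw [← PySem.List.index?_isSome_iff (v := k)]
        rw [hidx]; rfl
      have hIdxOf : (PySem.Str.split₀ s).idxOf k = i := by
        rw [List.idxOf_eq_getD_idxOf?, ← PySem.List.index?_eq_idxOf?, hidx]; rfl
      have hbest := foldl_stepBest_zero
        (f := fun w => (PySem.List.index? (k :: rest) w).map (fun m : Nat => (m : Int)))
        (k := k)
        (by
          show Option.map (fun m : Nat => (m : Int)) (PySem.List.index? (k :: rest) k) = some 0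
          rw [PySem.List.index?_cons_self]; rfl)
        (by
          intro w p hf
          rcases Option.map_eq_some_iff.mp hf with ⟨m, hm, hmp⟩
          by_cases hwk : w = k
          · subst hwk
            constructor
            · omega
            · intro _; rfl
          · rw [PySem.List.index?_cons_of_ne rest (fun h => hwk h.symm)] at hm
            rcases Option.map_eq_some_iff.mp hm with ⟨m', _, hm'⟩
            constructor
            · omega
            · intro hp; exfalso; omega)
        (PySem.Str.split₀ s) 0 none hmem (by intro b h; cases h)
      rw [hA]
      unfold altCanon
      rw [hbest, hIdxOf]
      simp

-- ===== VERDICT (by name: the statement is the Claim_ definition above) =====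
theorem TrimString_spec : Claim_equal_TrimString := by
  intro input_string keywords _
  unfold Spec_TrimString TrimString
  rw [alt_eq_canon, goA_eq_canon]
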